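-- pv_equiv track=rewrite | github.com/ishmam-hossain/python-console-international-bridge-automated-card-game | main.py | get_the_biggest_card
-- ===== SOURCE A (Python) =====
-- def get_the_biggest_card(running_pit):
--
--     card_precedence = {'2': 2,
--                        '3': 3,
--                        '4': 4,
--                        '5': 5,
--                        '6': 6,
--                        '7': 7,
--                        '8': 8,
--                        '9': 9,
--                        '10': 10,
--                        'joker': 11,
--                        'queen': 12,
--                        'king': 13,
--                        'ace': 14
--                        }
--
--     biggest_nmbr = 0
--     running_biggest_card = ()
--
--     for card in running_pit:
--         if card_precedence.get(card[1]) > biggest_nmbr and running_pit[0][0] == card[0]: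
--             biggest_nmbr = card_precedence.get(card[1])
--             running_biggest_card = card
--
--     if running_pit[0][0] != 'spades':
--         biggest_nmbr = 0
--         for card in running_pit:
--             if 'spades' in card:
--                 if card_precedence.get(card[1]) > biggest_nmbr:
--                     biggest_nmbr = card_precedence.get(card[1])
--                     running_biggest_card = card
--
--     return running_biggest_card
-- ===== SOURCE B (Python) =====
-- def get_the_biggest_card(running_pit):
--     card_precedence = {'2': 2, '3': 3, '4': 4, '5': 5, '6': 6, '7': 7,
--                        '8': 8, '9': 9, '10': 10, 'joker': 11, 'queen': 12,
--                        'king': 13, 'ace': 14}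
--     lead = running_pit[0][0]
--     if lead != 'spades' and any(c[0] == 'spades' for c in running_pit):
--         candidates = [c for c in running_pit if c[0] == 'spades']
--     else:
--         candidates = [c for c in running_pit if c[0] == lead]
--     return max(candidates, key=lambda c: card_precedence[c[1]])
-- ===== Notes on version B (the rewrite author's own statement) =====
-- stated objective: simpler
-- what changed: A's two sequential running-max loops with shared mutable state are replaced by selecting the candidate list once (spade cards if the lead is not spades and a spade was played, else lead-suit cards) and taking a single max(candidates, key=precedence).
import Mathlib
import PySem

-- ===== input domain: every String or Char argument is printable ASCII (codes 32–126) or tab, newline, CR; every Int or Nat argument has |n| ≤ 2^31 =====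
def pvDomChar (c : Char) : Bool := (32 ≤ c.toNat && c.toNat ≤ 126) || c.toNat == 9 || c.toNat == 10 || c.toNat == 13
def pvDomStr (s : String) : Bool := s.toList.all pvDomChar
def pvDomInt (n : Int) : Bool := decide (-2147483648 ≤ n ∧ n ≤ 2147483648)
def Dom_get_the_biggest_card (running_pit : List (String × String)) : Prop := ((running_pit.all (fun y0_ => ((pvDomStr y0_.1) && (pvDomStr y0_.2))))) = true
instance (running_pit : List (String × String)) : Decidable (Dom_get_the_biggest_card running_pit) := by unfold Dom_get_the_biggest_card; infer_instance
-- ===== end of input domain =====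

-- B replaces A's two running-max loops by selecting the candidate list (spades if trumping, else lead suit) and one max(...) call; objective: simpler.


-- ===== PORT A =====
-- the card_precedence dict (shared literal of both Pythons)
def pvCardPrec : PySem.Dict String Int :=
  PySem.Dict.ofList [("2", 2), ("3", 3), ("4", 4), ("5", 5), ("6", 6), ("7", 7),
                     ("8", 8), ("9", 9), ("10", 10), ("joker", 11), ("queen", 12),
                     ("king", 13), ("ace", 14)]

-- card_precedence.get(card[1]); Python compares this (possibly None) with '>': the none
-- case raises TypeError and is excluded by Pre_, so the port reads it with default 0 there.
def pvRank (card : String × String) : Int := (PySem.Dict.get? pvCardPrec card.2).getD 0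

def get_the_biggest_card (running_pit : List (String × String)) : List String :=
  -- first loop: running max over cards of the lead suit (running_pit[0][0], read in the loop)
  let s1 := running_pit.foldl
    (fun (st : Int × List String) card =>
      if pvRank card > st.1 ∧ ((PySem.List.pyGet? running_pit 0).getD ("", "")).1 = card.1
      then (pvRank card, [card.1, card.2]) else st)
    (0, [])
  -- if running_pit[0][0] != 'spades': second loop, running max restarted at 0 over spade cards
  if ((PySem.List.pyGet? running_pit 0).getD ("", "")).1 ≠ "spades" then
    (running_pit.foldl
      (fun (st : Int × List String) card =>
        if card.1 = "spades" ∨ card.2 = "spades" then   -- 'spades' in card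
          if pvRank card > st.1 then (pvRank card, [card.1, card.2]) else st
        else st)
      (0, s1.2)).2
  else s1.2

-- ===== PORT B =====
def get_the_biggest_card_alt (running_pit : List (String × String)) : List String :=
  let lead := ((PySem.List.pyGet? running_pit 0).getD ("", "")).1
  let candidates :=
    if lead ≠ "spades" ∧ running_pit.any (fun c => c.1 == "spades")
    then running_pit.filter (fun c => c.1 == "spades")
    else running_pit.filter (fun c => c.1 == lead)
  -- max(candidates, key=...); candidates is nonempty under Pre_, the none branch is unreachable there
  match PySem.List.max? candidates pvRank with
  | some m => [m.1, m.2]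
  | none => []

-- ===== PRECONDITION & SPEC =====
-- Pre_ excludes exactly the inputs where Python A raises: the empty pit (IndexError at
-- running_pit[0][0]) and any card value outside card_precedence (TypeError: None > int).
def Pre_get_the_biggest_card (running_pit : List (String × String)) : Prop :=
  running_pit ≠ [] ∧ ∀ c ∈ running_pit,
    c.2 ∈ (["2", "3", "4", "5", "6", "7", "8", "9", "10", "joker", "queen", "king", "ace"] : List String)
instance (running_pit : List (String × String)) : Decidable (Pre_get_the_biggest_card running_pit) := by unfold Pre_get_the_biggest_card; infer_instance

def pvWitness_get_the_biggest_card : (List (String × String)) :=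
  [("hearts", "3"), ("spades", "queen"), ("hearts", "ace")]

def Spec_get_the_biggest_card (running_pit : List (String × String)) (out : List String) : Prop := out = get_the_biggest_card_alt running_pit
instance (running_pit : List (String × String)) (out : List String) : Decidable (Spec_get_the_biggest_card running_pit out) := by unfold Spec_get_the_biggest_card; infer_instance

-- ===== CLAIM (what is proved, stated in full; the proofs are below) =====
def Claim_equal_get_the_biggest_card : Prop := ∀ (running_pit : List (String × String)), Dom_get_the_biggest_card running_pit → Pre_get_the_biggest_card running_pit → Spec_get_the_biggest_card running_pit (get_the_biggest_card running_pit)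

-- ===== LEMMAS AND PROOFS =====

-- the keep-first running max that PySem.List.max? folds with
def pvKeep (a c : String × String) : String × String := if pvRank a < pvRank c then c else a

lemma max?_foldl_some (ys : List (String × String)) :
    ∀ a, PySem.List.max? (a :: ys) pvRank = some (ys.foldl pvKeep a) := by
  induction ys with
  | nil => intro a; rfl
  | cons y t ih =>
    intro a
    show List.foldl _ (some a) (y :: t) = _
    simp only [List.foldl_cons, pvKeep]
    by_cases h : pvRank a < pvRank y
    · simpa [h] using ih y
    · simpa [h] using ih a

-- A's inner running-max step over a candidate list equals tracking the keep-first maximum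
lemma foldl_step_eq (ys : List (String × String)) :
    ∀ a : String × String,
      ys.foldl (fun (st : Int × List String) c =>
          if st.1 < pvRank c then (pvRank c, [c.1, c.2]) else st) (pvRank a, [a.1, a.2])
        = (pvRank (ys.foldl pvKeep a), [(ys.foldl pvKeep a).1, (ys.foldl pvKeep a).2]) := by
  induction ys with
  | nil => intro a; rfl
  | cons y t ih =>
    intro a
    simp only [List.foldl_cons, pvKeep]
    by_cases h : pvRank a < pvRank y
    · simpa [h] using ih y
    · simpa [h] using ih a

lemma rank_pos_of_mem (v : String)
    (hv : v ∈ (["2", "3", "4", "5", "6", "7", "8", "9", "10", "joker", "queen", "king", "ace"] : List String)) :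
    ∀ s : String, 0 < pvRank (s, v) := by
  intro s
  fin_cases hv <;> simp [pvRank, pvCardPrec] <;> decide

-- master form: a running-max loop of A's shape, started at 0, over a filtered list
lemma loop_eq_max? (p : String × String → Bool) (xs : List (String × String)) (v0 : List String)
    (hpos : ∀ c ∈ xs, p c → 0 < pvRank c) :
    (xs.foldl (fun (st : Int × List String) c =>
        if p c then (if st.1 < pvRank c then (pvRank c, [c.1, c.2]) else st) else st) (0, v0)).2
      = match PySem.List.max? (xs.filter p) pvRank with
        | some m => [m.1, m.2]
        | none => v0 := by
  rw [PySem.List.foldl_if_eq_foldl_filter]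
  have hmem : ∀ c ∈ xs.filter p, 0 < pvRank c := by
    intro c hc
    exact hpos c (List.mem_of_mem_filter hc) (List.of_mem_filter hc)
  cases hf : xs.filter p with
  | nil => rfl
  | cons a t =>
    have ha : 0 < pvRank a := hmem a (by rw [hf]; exact List.mem_cons_self)
    rw [max?_foldl_some]
    have : (0 : Int) < pvRank a := ha
    simp only [List.foldl_cons, if_pos this]
    exact congrArg Prod.snd (foldl_step_eq t a)

-- ===== VERDICT (by name: the statement is the Claim_ definition above) =====
theorem get_the_biggest_card_spec : Claim_equal_get_the_biggest_card := by
  intro pit _hdom hpre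
  obtain ⟨hne, hvals⟩ := hpre
  obtain ⟨h, t, rfl⟩ : ∃ h t, pit = h :: t := by
    cases pit with
    | nil => exact absurd rfl hne
    | cons h t => exact ⟨h, t, rfl⟩
  have hpos : ∀ c ∈ h :: t, 0 < pvRank c := by
    intro c hc
    have := rank_pos_of_mem c.2 (hvals c hc) c.1
    simpa using this
  have hget : (PySem.List.pyGet? (h :: t) 0).getD ("", "") = h := by
    simp [PySem.List.pyGet?, PySem.List.pyIdx?]
  -- normalise both conditions and massage port A's loops into the master form
  unfold Spec_get_the_biggest_card get_the_biggest_card get_the_biggest_card_alt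
  simp only [hget]
  -- loop 1: condition reordered into the guarded form
  have l1 : (h :: t).foldl (fun (st : Int × List String) card =>
        if pvRank card > st.1 ∧ h.1 = card.1 then (pvRank card, [card.1, card.2]) else st) (0, [])
      = (h :: t).foldl (fun (st : Int × List String) card =>
        if (card.1 == h.1) then (if st.1 < pvRank card then (pvRank card, [card.1, card.2]) else st) else st) (0, []) := by
    apply PySem.List.foldl_congr_mem
    intro st c _
    have hb : ((c.1 == h.1) = true) ↔ (h.1 = c.1) := by rw [beq_iff_eq]; exact eq_comm
    by_cases h1 : h.1 = c.1 <;> by_cases h2 : st.1 < pvRank c <;>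
      simp [h1, h2, hb, gt_iff_lt]
  -- loop 2: under Pre_ no card value is "spades", so 'spades' in card is a suit test
  have hnospade : ∀ c ∈ h :: t, c.2 ≠ "spades" := by
    intro c hc hcon
    have := hvals c hc
    rw [hcon] at this
    simp at this
  have l2 : ∀ v1 : List String, (h :: t).foldl (fun (st : Int × List String) card =>
        if card.1 = "spades" ∨ card.2 = "spades" then
          (if pvRank card > st.1 then (pvRank card, [card.1, card.2]) else st) else st) (0, v1)
      = (h :: t).foldl (fun (st : Int × List String) card =>
        if (card.1 == "spades") then (if st.1 < pvRank card then (pvRank card, [card.1, card.2]) else st) else st) (0, v1) := by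
    intro v1
    apply PySem.List.foldl_congr_mem
    intro st c hc
    by_cases h1 : c.1 = "spades" <;>
      simp [h1, hnospade c hc, gt_iff_lt]
  simp only [ne_eq]
  rw [l1, l2]
  have eq1 := loop_eq_max? (fun c => c.1 == h.1) (h :: t) [] (fun c hc _ => hpos c hc)
  have eq2 := fun v1 => loop_eq_max? (fun c => c.1 == "spades") (h :: t) v1 (fun c hc _ => hpos c hc)
  by_cases hs : h.1 = "spades"
  · -- lead is spades: A skips loop 2, B takes the lead-suit candidates
    rw [if_neg (not_not_intro hs), if_neg (fun hc => hc.1 hs)]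
    exact eq1
  · by_cases hany : (h :: t).any (fun c => c.1 == "spades") = true
    · -- a spade was played: both take the spade candidates
      rw [if_pos hs, if_pos (⟨hs, hany⟩ : ¬h.1 = "spades" ∧ _)]
      rw [eq2]
      obtain ⟨c, hc, hcp⟩ := List.any_eq_true.mp hany
      have hf : (h :: t).filter (fun c => c.1 == "spades") ≠ [] :=
        fun hnil => (List.filter_eq_nil_iff.mp hnil) c hc hcp
      cases hm : PySem.List.max? ((h :: t).filter (fun c => c.1 == "spades")) pvRank with
      | none => exact absurd ((PySem.List.max?_eq_none_iff _ _).mp hm) hf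
      | some m => rfl
    · -- no spade: loop 2 changes nothing, both take the lead-suit candidates
      rw [if_pos hs, if_neg (fun hc => hany hc.2)]
      rw [eq2]
      have hf : (h :: t).filter (fun c => c.1 == "spades") = [] :=
        List.filter_eq_nil_iff.mpr (fun a ha hpa => hany (List.any_eq_true.mpr ⟨a, ha, hpa⟩))
      rw [hf]
      have hnone : PySem.List.max? ([] : List (String × String)) pvRank = none := rfl
      rw [hnone]
      exact eq1
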